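-- pv_equiv track=rewrite | github.com/izabael/izabael-com | database.py | _coerce_provider
-- ===== SOURCE A (Python) =====
-- KNOWN_PROVIDERS: frozenset[str] = frozenset({
--     "anthropic",
--     "google",
--     "gemini",
--     "deepseek",
--     "openai",
--     "cohere",
--     "mistral",
--     "grok",
--     "xai",
--     "huggingface",
--     "local",
--     "unknown",
-- })
--
-- _PROVIDER_PREFIXES: list[tuple[str, str]] = [
--     # Model-name prefix → canonical provider name.
--     # Lets callers pass provider="claude-haiku-4-5" and still get a tag.
--     ("claude-", "anthropic"),
--     ("gpt-", "openai"),
--     ("o1-", "openai"),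
--     ("o3-", "openai"),
--     ("gemini-", "gemini"),
--     ("llama-", "local"),
--     ("mistral-", "mistral"),
-- ]
--
-- def _coerce_provider(provider: str | None) -> str | None:
--     """Normalize a provider tag — lowercase + strip + validate.
--
--     Accepts both canonical provider names (e.g. "anthropic") and model-name
--     strings (e.g. "claude-haiku-4-5" → "anthropic") via prefix matching.
--     Returns None for unknown values so they don't pollute the corpus.
--     """
--     if provider is None:
--         return None
--     p = str(provider).strip().lower()
--     if not p:
--         return None
--     if p in KNOWN_PROVIDERS:
--         return p
--     for prefix, canonical in _PROVIDER_PREFIXES: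
--         if p.startswith(prefix):
--             return canonical
--     return None
-- ===== SOURCE B (Python) =====
-- KNOWN_PROVIDERS = frozenset({
--     "anthropic", "google", "gemini", "deepseek", "openai", "cohere",
--     "mistral", "grok", "xai", "huggingface", "local", "unknown",
-- })
--
-- # Bare tokens: a tag only reaches this table when it actually contains a dash
-- # (sep is non-empty), so "gpt" alone can never match spuriously.
-- _PREFIX_MAP = {
--     "claude": "anthropic",
--     "gpt": "openai",
--     "o1": "openai",
--     "o3": "openai",
--     "gemini": "gemini",
--     "llama": "local",
--     "mistral": "mistral",
-- }
--
-- def _coerce_provider(provider):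
--     if provider is None:
--         return None
--     p = str(provider).strip().lower()
--     if p in KNOWN_PROVIDERS:
--         return p
--     head, sep, _tail = p.partition("-")
--     return _PREFIX_MAP.get(head) if sep else None
-- ===== Notes on version B (the rewrite author's own statement) =====
-- stated objective: idiomatic
-- what changed: Replaces the startswith scan over a list of dash-terminated prefixes by str.partition at the first dash plus a single dict lookup of the bare head token (the non-empty separator guarantees a dash was present), and drops the now-redundant empty-string guard.
import Mathlib
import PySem

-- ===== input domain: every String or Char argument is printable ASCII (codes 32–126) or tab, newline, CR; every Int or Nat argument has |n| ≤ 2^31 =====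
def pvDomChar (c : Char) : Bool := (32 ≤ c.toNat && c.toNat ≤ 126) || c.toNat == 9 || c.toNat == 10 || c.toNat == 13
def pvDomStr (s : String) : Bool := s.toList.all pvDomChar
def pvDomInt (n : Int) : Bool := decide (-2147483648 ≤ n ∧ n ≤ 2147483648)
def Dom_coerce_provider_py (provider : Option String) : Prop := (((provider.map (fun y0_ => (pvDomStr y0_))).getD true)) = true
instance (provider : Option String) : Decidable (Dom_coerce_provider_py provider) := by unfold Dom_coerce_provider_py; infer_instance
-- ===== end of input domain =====

-- B replaces A's startswith scan over a table of dash-terminated prefixes by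
-- str.partition at the first dash plus one dict lookup of the bare head token
-- (idiomatic; the non-empty separator guard makes bare tokens safe).

-- ===== PORT A =====
def knownProviders : List String :=
  ["anthropic", "google", "gemini", "deepseek", "openai", "cohere",
   "mistral", "grok", "xai", "huggingface", "local", "unknown"]

def providerPrefixes : List (String × String) :=
  [("claude-", "anthropic"), ("gpt-", "openai"), ("o1-", "openai"),
   ("o3-", "openai"), ("gemini-", "gemini"), ("llama-", "local"),
   ("mistral-", "mistral")]

def scanPrefixes : List (String × String) → String → Option String
  | [], _ => none
  | (prefix_, canonical) :: rest, p =>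
    if PySem.Str.startswith p prefix_ then some canonical else scanPrefixes rest p

def coerce_provider_py (provider : Option String) : Option String :=
  match provider with
  | none => none
  | some s =>
    let p := PySem.Str.lower (PySem.Str.strip s)
    if p = "" then none
    else if p ∈ knownProviders then some p
    else scanPrefixes providerPrefixes p

-- ===== PORT B =====
-- Hand port of Python's p.partition("-") for the one-char separator '-':
-- returns (head, sep-found?, tail); exact because a 1-char separator occurs
-- first at the first '-' character.
def partitionDash : List Char → List Char × Bool × List Char
  | [] => ([], false, [])
  | c :: rest =>
    if c = '-' then ([], true, rest)
    else
      let r := partitionDash rest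
      (c :: r.1, r.2.1, r.2.2)

def prefixMap : PySem.Dict String String :=
  PySem.Dict.ofList
    [("claude", "anthropic"), ("gpt", "openai"), ("o1", "openai"),
     ("o3", "openai"), ("gemini", "gemini"), ("llama", "local"),
     ("mistral", "mistral")]

def coerce_provider_py_alt (provider : Option String) : Option String :=
  match provider with
  | none => none
  | some s =>
    let p := PySem.Str.lower (PySem.Str.strip s)
    if p ∈ knownProviders then some p
    else
      let r := partitionDash p.toList
      if r.2.1 then prefixMap.get? (String.ofList r.1) else none

-- ===== PRECONDITION & SPEC =====
def Spec_coerce_provider_py (provider : Option String) (out : Option String) : Prop := out = coerce_provider_py_alt provider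
instance (provider : Option String) (out : Option String) : Decidable (Spec_coerce_provider_py provider out) := by unfold Spec_coerce_provider_py; infer_instance

-- ===== CLAIM (what is proved, stated in full; the proofs are below) =====
def Claim_equal_coerce_provider_py : Prop := ∀ (provider : Option String), Dom_coerce_provider_py provider → Spec_coerce_provider_py provider (coerce_provider_py provider)

-- ===== LEMMAS AND PROOFS =====

-- For a dash-free token w, "w-" is a prefix of l iff partitionDash found a
-- dash and its head is exactly w.
theorem prefix_iff_part (l : List Char) : ∀ (w : List Char), '-' ∉ w →
    ((w ++ ['-'] <+: l) ↔ ((partitionDash l).2.1 = true ∧ (partitionDash l).1 = w)) := by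
  induction l with
  | nil =>
    intro w _
    simp [partitionDash, List.prefix_iff_eq_take]
  | cons c rest ih =>
    intro w hw
    cases w with
    | nil =>
      by_cases hc : c = '-'
      · subst hc
        simp [partitionDash, List.cons_prefix_cons]
      · simp [partitionDash, hc, List.cons_prefix_cons, Ne.symm hc]
    | cons a w' =>
      have ha : a ≠ '-' := fun h => hw (h ▸ List.mem_cons_self)
      have hw' : '-' ∉ w' := fun h => hw (List.mem_cons_of_mem a h)
      by_cases hc : c = '-'
      · subst hc
        simp [partitionDash, List.cons_prefix_cons, ha]
      · simp only [partitionDash, if_neg hc, List.cons_append, List.cons_prefix_cons, ih w' hw']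
        constructor
        · rintro ⟨h1, h2, h3⟩
          exact ⟨h2, by rw [h1, h3]⟩
        · rintro ⟨h1, h2⟩
          injection h2 with hca hhw
          exact ⟨hca.symm, h1, hhw⟩

-- Turn each startswith test into an equality test on partitionDash's head.
theorem startswith_eq_part (p : String) (pre : String) (w : List Char)
    (hpre : pre.toList = w ++ ['-']) (hw : '-' ∉ w)
    (hfound : (partitionDash p.toList).2.1 = true) :
    PySem.Str.startswith p pre = ((partitionDash p.toList).1 == w) := by
  rw [Bool.eq_iff_iff, PySem.Str.startswith_eq, PySem.Chars.startswith_iff, hpre,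
    prefix_iff_part p.toList w hw, beq_iff_eq]
  simp [hfound]

-- The scan over the prefix table equals partition + single keyed lookup.
theorem scan_eq_part (p : String) :
    scanPrefixes providerPrefixes p =
      (if (partitionDash p.toList).2.1 then
        prefixMap.get? (String.ofList (partitionDash p.toList).1)
       else none) := by
  by_cases hfound : (partitionDash p.toList).2.1 = true
  · rw [if_pos hfound]
    set h := (partitionDash p.toList).1 with hh
    have hc1 := startswith_eq_part p "claude-" "claude".toList (by decide) (by decide) hfound
    have hc2 := startswith_eq_part p "gpt-" "gpt".toList (by decide) (by decide) hfound
    have hc3 := startswith_eq_part p "o1-" "o1".toList (by decide) (by decide) hfound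
    have hc4 := startswith_eq_part p "o3-" "o3".toList (by decide) (by decide) hfound
    have hc5 := startswith_eq_part p "gemini-" "gemini".toList (by decide) (by decide) hfound
    have hc6 := startswith_eq_part p "llama-" "llama".toList (by decide) (by decide) hfound
    have hc7 := startswith_eq_part p "mistral-" "mistral".toList (by decide) (by decide) hfound
    have hmap : prefixMap = PySem.Dict.mk
        [("claude", "anthropic"), ("gpt", "openai"), ("o1", "openai"),
         ("o3", "openai"), ("gemini", "gemini"), ("llama", "local"),
         ("mistral", "mistral")] := by decide
    have hkcond : ∀ (key : String), (key == String.ofList h) = (h == key.toList) := by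
      intro key
      rw [Bool.eq_iff_iff, beq_iff_eq, beq_iff_eq]
      constructor
      · intro e; rw [e]; simp
      · intro e; rw [e]; simp
    rw [hmap]
    simp only [scanPrefixes, providerPrefixes, ← hh, hc1, hc2, hc3, hc4, hc5, hc6, hc7,
      PySem.Dict.get?_mk_cons, hkcond]
    rfl
  · rw [if_neg hfound]
    have hno : ∀ (pre : String) (w : List Char), pre.toList = w ++ ['-'] → '-' ∉ w →
        PySem.Str.startswith p pre = false := by
      intro pre w hpre hw
      rw [Bool.eq_false_iff]
      intro hsw
      rw [PySem.Str.startswith_eq] at hsw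
      have := (PySem.Chars.startswith_iff _ _).mp hsw
      rw [hpre, prefix_iff_part p.toList w hw] at this
      exact hfound this.1
    have h1 := hno "claude-" "claude".toList (by decide) (by decide)
    have h2 := hno "gpt-" "gpt".toList (by decide) (by decide)
    have h3 := hno "o1-" "o1".toList (by decide) (by decide)
    have h4 := hno "o3-" "o3".toList (by decide) (by decide)
    have h5 := hno "gemini-" "gemini".toList (by decide) (by decide)
    have h6 := hno "llama-" "llama".toList (by decide) (by decide)
    have h7 := hno "mistral-" "mistral".toList (by decide) (by decide)
    simp only [scanPrefixes, providerPrefixes, h1, h2, h3, h4, h5, h6, h7,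
      Bool.false_eq_true, if_false]

-- ===== VERDICT (by name: the statement is the Claim_ definition above) =====
theorem coerce_provider_py_spec : Claim_equal_coerce_provider_py := by
  intro provider _
  unfold Spec_coerce_provider_py
  cases provider with
  | none => rfl
  | some s =>
    simp only [coerce_provider_py, coerce_provider_py_alt]
    by_cases h1 : PySem.Str.lower (PySem.Str.strip s) = ""
    · simp [h1, knownProviders, partitionDash]
    · by_cases h2 : PySem.Str.lower (PySem.Str.strip s) ∈ knownProviders <;>
        simp [h1, h2, scan_eq_part]
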